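-- pv_equiv track=rewrite | github.com/AvneetSidhu/strands-solver | strand.py | span_top_to_bottom
-- ===== SOURCE A (Python) =====
-- def span_top_to_bottom(path):
--     start = False
--     end = False
--
--     for i in range(6):
--         if (0, i) in path:
--             start = True
--         if (7, i) in path:
--             end = True
--     return start and end
-- ===== SOURCE B (Python) =====
-- def span_top_to_bottom(path):
--     TOP = {(0, i) for i in range(6)}
--     BOT = {(7, i) for i in range(6)}
--     start = False
--     end = False
--     for cell in path:
--         if cell in TOP:
--             start = True
--         if cell in BOT:
--             end = True
--     return start and end
-- ===== Notes on version B (the rewrite author's own statement) =====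
-- stated objective: alternative
-- what changed: Inverted the traversal: instead of probing the path 12 times with fixed (row,col) membership tests over range(6), B builds the two fixed target sets TOP and BOT once and makes a single pass over the path, flagging start/end per cell.
import Mathlib
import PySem

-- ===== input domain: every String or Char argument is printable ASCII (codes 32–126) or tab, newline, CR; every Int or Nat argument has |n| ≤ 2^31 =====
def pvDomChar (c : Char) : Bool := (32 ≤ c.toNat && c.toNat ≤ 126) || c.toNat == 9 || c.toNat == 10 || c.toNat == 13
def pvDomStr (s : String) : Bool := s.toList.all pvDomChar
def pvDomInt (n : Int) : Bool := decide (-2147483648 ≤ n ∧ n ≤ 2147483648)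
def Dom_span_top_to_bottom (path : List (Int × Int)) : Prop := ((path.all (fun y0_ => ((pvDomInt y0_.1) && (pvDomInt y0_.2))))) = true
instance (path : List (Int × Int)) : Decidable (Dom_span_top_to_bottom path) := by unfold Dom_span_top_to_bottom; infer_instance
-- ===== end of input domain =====

-- B inverts the traversal: one pass over the path against two precomputed fixed
-- target sets, instead of A's 12 membership probes of the path; same cost, alternative structure.

-- ===== PORT A =====
def span_top_to_bottom (path : List (Int × Int)) : Bool :=
  -- start = False; end = False; for i in range(6): if (0,i) in path: start=True; if (7,i) in path: end=True
  let st := (PySem.List.pyRange 0 6 1).foldl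
    (fun (s : Bool × Bool) i =>
      (if path.contains ((0 : Int), i) then true else s.1,
       if path.contains ((7 : Int), i) then true else s.2))
    (false, false)
  st.1 && st.2

-- ===== PORT B =====
def span_top_to_bottom_alt (path : List (Int × Int)) : Bool :=
  -- TOP = {(0,i) for i in range(6)}; BOT = {(7,i) for i in range(6)}
  let top : PySem.Set (Int × Int) :=
    PySem.Set.ofList ((PySem.List.pyRange 0 6 1).map (fun i => ((0 : Int), i)))
  let bot : PySem.Set (Int × Int) :=
    PySem.Set.ofList ((PySem.List.pyRange 0 6 1).map (fun i => ((7 : Int), i)))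
  -- single pass over path
  let st := path.foldl
    (fun (s : Bool × Bool) cell =>
      (if PySem.Set.contains top cell then true else s.1,
       if PySem.Set.contains bot cell then true else s.2))
    (false, false)
  st.1 && st.2

-- ===== PRECONDITION & SPEC =====
def Spec_span_top_to_bottom (path : List (Int × Int)) (out : Bool) : Prop := out = span_top_to_bottom_alt path
instance (path : List (Int × Int)) (out : Bool) : Decidable (Spec_span_top_to_bottom path out) := by unfold Spec_span_top_to_bottom; infer_instance

-- ===== CLAIM (what is proved, stated in full; the proofs are below) =====
def Claim_equal_span_top_to_bottom : Prop := ∀ (path : List (Int × Int)), Dom_span_top_to_bottom path → Spec_span_top_to_bottom path (span_top_to_bottom path)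

-- ===== LEMMAS AND PROOFS =====

-- ===== VERDICT (by name: the statement is the Claim_ definition above) =====
-- B's fold over the path, with the flag state generalized.
theorem altFold_char (path : List (Int × Int)) (s : Bool × Bool) (top bot : PySem.Set (Int × Int)) :
    path.foldl
      (fun (s : Bool × Bool) cell =>
        (if PySem.Set.contains top cell then true else s.1,
         if PySem.Set.contains bot cell then true else s.2)) s
    = (s.1 || path.any (fun c => PySem.Set.contains top c),
       s.2 || path.any (fun c => PySem.Set.contains bot c)) := by
  induction path generalizing s with
  | nil => simp
  | cons c cs ih =>
    simp only [List.foldl_cons, List.any_cons, ih]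
    cases h1 : PySem.Set.contains top c <;> cases h2 : PySem.Set.contains bot c <;> simp

theorem span_top_to_bottom_spec : Claim_equal_span_top_to_bottom := by
  intro path _
  unfold Spec_span_top_to_bottom
  simp only [span_top_to_bottom, span_top_to_bottom_alt]
  rw [altFold_char]
  simp only [show PySem.List.pyRange 0 6 1 = [0, 1, 2, 3, 4, 5] from rfl,
    List.foldl_cons, List.foldl_nil, Bool.if_true_left, Bool.false_or]
  rw [Bool.eq_iff_iff]
  simp only [Bool.and_eq_true, Bool.or_eq_true, List.any_eq_true, decide_eq_true_eq,
    List.contains_iff_mem, PySem.Set.contains_iff, PySem.Set.mem_ofList, List.map_cons, List.map_nil, List.mem_cons, List.not_mem_nil, or_false]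
  constructor <;> rintro ⟨h1, h2⟩ <;>
    exact ⟨by rcases h1 with _|_|_|_|_|_ <;> aesop, by rcases h2 with _|_|_|_|_|_ <;> aesop⟩
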